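-- pv_equiv track=rewrite | github.com/QSOLKCB/QEC | src/qec/analysis/lattice_drift_replay_alignment.py | _proof_status
-- ===== SOURCE A (Python) =====
-- from typing import Any, Sequence
--
-- def _proof_status(statuses: Sequence[str]) -> str:
--     if any(s == "REPLAY_INCONSISTENT" for s in statuses):
--         return "REPLAY_INCONSISTENT"
--     if any(s == "REPLAY_MISSING" for s in statuses):
--         return "REPLAY_INCOMPLETE"
--     if any(s == "REPLAY_DRIFT" for s in statuses):
--         return "REPLAY_DRIFT_DETECTED"
--     return "REPLAY_ALIGNED"
-- ===== SOURCE B (Python) =====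
-- _PRIORITY = {
--     "REPLAY_INCONSISTENT": (0, "REPLAY_INCONSISTENT"),
--     "REPLAY_MISSING": (1, "REPLAY_INCOMPLETE"),
--     "REPLAY_DRIFT": (2, "REPLAY_DRIFT_DETECTED"),
-- }
--
-- def _proof_status(statuses):
--     best = (3, "REPLAY_ALIGNED")
--     for s in statuses:
--         r = _PRIORITY.get(s, best)
--         if r[0] < best[0]:
--             best = r
--     return best[1]
-- ===== Notes on version B (the rewrite author's own statement) =====
-- stated objective: alternative
-- what changed: Three sequential short-circuit membership scans are replaced by a single table-driven pass that tracks the minimum-priority (rank, result) pair seen.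
import Mathlib
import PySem

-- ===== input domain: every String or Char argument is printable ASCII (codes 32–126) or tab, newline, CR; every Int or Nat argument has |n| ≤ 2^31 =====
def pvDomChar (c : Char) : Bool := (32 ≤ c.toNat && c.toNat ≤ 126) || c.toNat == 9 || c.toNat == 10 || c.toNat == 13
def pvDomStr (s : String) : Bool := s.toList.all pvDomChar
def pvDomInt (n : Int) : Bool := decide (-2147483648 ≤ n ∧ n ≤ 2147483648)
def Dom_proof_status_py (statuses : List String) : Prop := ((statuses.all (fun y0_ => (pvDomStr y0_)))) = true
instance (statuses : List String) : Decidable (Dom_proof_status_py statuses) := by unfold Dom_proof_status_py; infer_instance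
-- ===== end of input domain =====

-- B replaces A's three sequential short-circuit scans by a single table-driven pass
-- tracking the minimum-rank (rank, result) pair (objective: alternative; same O(n) cost).


-- ===== PORT A =====
def proof_status_py (statuses : List String) : String :=
  if statuses.any (fun s => s == "REPLAY_INCONSISTENT") then "REPLAY_INCONSISTENT"
  else if statuses.any (fun s => s == "REPLAY_MISSING") then "REPLAY_INCOMPLETE"
  else if statuses.any (fun s => s == "REPLAY_DRIFT") then "REPLAY_DRIFT_DETECTED"
  else "REPLAY_ALIGNED"

-- ===== PORT B =====
def pvPriorityTable : PySem.Dict String (Int × String) :=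
  PySem.Dict.ofList [("REPLAY_INCONSISTENT", (0, "REPLAY_INCONSISTENT")),
                     ("REPLAY_MISSING", (1, "REPLAY_INCOMPLETE")),
                     ("REPLAY_DRIFT", (2, "REPLAY_DRIFT_DETECTED"))]

def pvStep (best : Int × String) (s : String) : Int × String :=
  let r := pvPriorityTable.getD s best
  if r.1 < best.1 then r else best

def proof_status_py_alt (statuses : List String) : String :=
  (statuses.foldl pvStep (3, "REPLAY_ALIGNED")).2

-- ===== PRECONDITION & SPEC =====
def Spec_proof_status_py (statuses : List String) (out : String) : Prop := out = proof_status_py_alt statuses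
instance (statuses : List String) (out : String) : Decidable (Spec_proof_status_py statuses out) := by unfold Spec_proof_status_py; infer_instance

-- ===== CLAIM (what is proved, stated in full; the proofs are below) =====
def Claim_equal_proof_status_py : Prop := ∀ (statuses : List String), Dom_proof_status_py statuses → Spec_proof_status_py statuses (proof_status_py statuses)

-- ===== LEMMAS AND PROOFS =====

/-- Rank of a status string: 0,1,2 for the three recognised statuses, 3 otherwise. -/
def pvRk (s : String) : Int :=
  if s = "REPLAY_INCONSISTENT" then 0
  else if s = "REPLAY_MISSING" then 1
  else if s = "REPLAY_DRIFT" then 2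
  else 3

/-- The accumulator value of B's loop at rank r (only 0..3 occur). -/
def pvVal (r : Int) : Int × String :=
  if r = 0 then (0, "REPLAY_INCONSISTENT")
  else if r = 1 then (1, "REPLAY_INCOMPLETE")
  else if r = 2 then (2, "REPLAY_DRIFT_DETECTED")
  else (3, "REPLAY_ALIGNED")

theorem pvTable_eq : pvPriorityTable =
    PySem.Dict.mk [("REPLAY_INCONSISTENT", (0, "REPLAY_INCONSISTENT")),
                   ("REPLAY_MISSING", (1, "REPLAY_INCOMPLETE")),
                   ("REPLAY_DRIFT", (2, "REPLAY_DRIFT_DETECTED"))] := by decide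

theorem pvStep_val (s : String) (r : Int) (h0 : 0 ≤ r) (h3 : r ≤ 3) :
    pvStep (pvVal r) s = pvVal (min (pvRk s) r) := by
  by_cases h1 : s = "REPLAY_INCONSISTENT"
  · subst h1
    have hg : ∀ d, pvPriorityTable.getD "REPLAY_INCONSISTENT" d = (0, "REPLAY_INCONSISTENT") := by
      intro d; rfl
    simp only [pvStep, hg, pvRk]
    unfold pvVal
    split_ifs <;> first | rfl | omega
  · by_cases h2 : s = "REPLAY_MISSING"
    · subst h2
      have hg : ∀ d, pvPriorityTable.getD "REPLAY_MISSING" d = (1, "REPLAY_INCOMPLETE") := by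
        intro d; rfl
      simp only [pvStep, hg, pvRk]
      norm_num
      unfold pvVal
      split_ifs <;> first | rfl | omega
    · by_cases h4 : s = "REPLAY_DRIFT"
      · subst h4
        have hg : ∀ d, pvPriorityTable.getD "REPLAY_DRIFT" d = (2, "REPLAY_DRIFT_DETECTED") := by
          intro d; rfl
        simp only [pvStep, hg, pvRk]
        norm_num
        unfold pvVal
        split_ifs <;> first | rfl | omega
      · have hg : pvPriorityTable.getD s (pvVal r) = pvVal r := by
          simp [PySem.Dict.getD, pvTable_eq, Ne.symm h1, Ne.symm h2, Ne.symm h4, PySem.Dict.get?]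
        have hrk : pvRk s = 3 := by simp [pvRk, h1, h2, h4]
        simp only [pvStep, hg, hrk, lt_irrefl]
        have : min (3 : Int) r = r := by omega
        rw [this]
        simp

theorem pvFold_val (l : List String) (r : Int) (h0 : 0 ≤ r) (h3 : r ≤ 3) :
    l.foldl pvStep (pvVal r) = pvVal (l.foldl (fun m s => min (pvRk s) m) r) := by
  induction l generalizing r with
  | nil => rfl
  | cons s t ih =>
    have hrk : 0 ≤ pvRk s ∧ pvRk s ≤ 3 := by unfold pvRk; split_ifs <;> omega
    simp only [List.foldl_cons, pvStep_val s r h0 h3]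
    exact ih (min (pvRk s) r) (by omega) (by omega)

theorem pvFold_le (l : List String) (r : Int) :
    l.foldl (fun m s => min (pvRk s) m) r ≤ r := by
  induction l generalizing r with
  | nil => simp
  | cons a t ih => exact le_trans (ih (min (pvRk a) r)) (min_le_right _ _)

theorem pvM_mem (l : List String) (r : Int) (s : String) (hs : s ∈ l) :
    l.foldl (fun m s => min (pvRk s) m) r ≤ pvRk s := by
  induction l generalizing r with
  | nil => cases hs
  | cons a t ih =>
    rw [List.mem_cons] at hs
    simp only [List.foldl_cons]
    rcases hs with h | h
    · subst h
      exact le_trans (pvFold_le t _) (min_le_left _ _)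
    · exact ih _ h

theorem pvM_cases (l : List String) (r : Int) :
    l.foldl (fun m s => min (pvRk s) m) r = r ∨
      ∃ s ∈ l, l.foldl (fun m s => min (pvRk s) m) r = pvRk s := by
  induction l generalizing r with
  | nil => exact Or.inl rfl
  | cons a t ih =>
    simp only [List.foldl_cons]
    rcases ih (min (pvRk a) r) with h | ⟨s, hs, h⟩
    · rcases le_total (pvRk a) r with hle | hle
      · exact Or.inr ⟨a, List.mem_cons_self, by rw [h]; omega⟩
      · exact Or.inl (by rw [h]; omega)
    · exact Or.inr ⟨s, List.mem_cons_of_mem _ hs, h⟩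

theorem pvRk_eq_zero {s : String} (h : pvRk s = 0) : s = "REPLAY_INCONSISTENT" := by
  unfold pvRk at h; split_ifs at h with h1 h2 h3 <;> first | assumption | omega

theorem pvRk_eq_one {s : String} (h : pvRk s = 1) : s = "REPLAY_MISSING" := by
  unfold pvRk at h; split_ifs at h with h1 h2 h3 <;> first | assumption | omega

theorem pvRk_eq_two {s : String} (h : pvRk s = 2) : s = "REPLAY_DRIFT" := by
  unfold pvRk at h; split_ifs at h with h1 h2 h3 <;> first | assumption | omega

-- ===== VERDICT (by name: the statement is the Claim_ definition above) =====
theorem proof_status_py_spec : Claim_equal_proof_status_py := by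
  intro l _
  unfold Spec_proof_status_py proof_status_py proof_status_py_alt
  have h30 : ((3 : Int), "REPLAY_ALIGNED") = pvVal 3 := rfl
  rw [h30, pvFold_val l 3 (by omega) (by omega)]
  set M := l.foldl (fun m s => min (pvRk s) m) 3 with hM
  have hMle : ∀ s ∈ l, M ≤ pvRk s := fun s hs => pvM_mem l 3 s hs
  have hMcases := pvM_cases l 3
  rw [← hM] at hMcases
  by_cases h1 : "REPLAY_INCONSISTENT" ∈ l
  · have : M ≤ 0 := by simpa [pvRk] using hMle _ h1
    have hM0 : M = 0 := by
      rcases hMcases with h | ⟨s, _, h⟩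
      · omega
      · have : (0:Int) ≤ pvRk s := by unfold pvRk; split_ifs <;> omega
        omega
    simp [List.any_eq_true, h1, hM0, pvVal]
  · have hne0 : M ≠ 0 := by
      intro h0
      rcases hMcases with h | ⟨s, hs, h⟩
      · omega
      · exact h1 (pvRk_eq_zero (h ▸ h0) ▸ hs)
    by_cases h2 : "REPLAY_MISSING" ∈ l
    · have : M ≤ 1 := by simpa [pvRk] using hMle _ h2
      have hM1 : M = 1 := by
        rcases hMcases with h | ⟨s, _, h⟩
        · omega
        · have : (0:Int) ≤ pvRk s := by unfold pvRk; split_ifs <;> omega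
          omega
      have h1' : ¬ l.any (fun s => s == "REPLAY_INCONSISTENT") := by
        simpa [List.any_eq_true] using h1
      simp [List.any_eq_true, h1', h2, hM1, pvVal]
    · have hne1 : M ≠ 1 := by
        intro h0
        rcases hMcases with h | ⟨s, hs, h⟩
        · omega
        · exact h2 (pvRk_eq_one (h ▸ h0) ▸ hs)
      by_cases h3 : "REPLAY_DRIFT" ∈ l
      · have : M ≤ 2 := by simpa [pvRk] using hMle _ h3
        have hM2 : M = 2 := by
          rcases hMcases with h | ⟨s, _, h⟩
          · omega
          · have : (0:Int) ≤ pvRk s := by unfold pvRk; split_ifs <;> omega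
            omega
        have h1' : ¬ l.any (fun s => s == "REPLAY_INCONSISTENT") := by
          simpa [List.any_eq_true] using h1
        have h2' : ¬ l.any (fun s => s == "REPLAY_MISSING") := by
          simpa [List.any_eq_true] using h2
        simp [List.any_eq_true, h1', h2', h3, hM2, pvVal]
      · have hne2 : M ≠ 2 := by
          intro h0
          rcases hMcases with h | ⟨s, hs, h⟩
          · omega
          · exact h3 (pvRk_eq_two (h ▸ h0) ▸ hs)
        have hM3 : M = 3 := by
          rcases hMcases with h | ⟨s, hs, h⟩
          · exact h
          · have hle3 : pvRk s ≤ 3 := by unfold pvRk; split_ifs <;> omega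
            have hge : (0:Int) ≤ pvRk s := by unfold pvRk; split_ifs <;> omega
            have := hMle s hs
            omega
        have h1' : ¬ l.any (fun s => s == "REPLAY_INCONSISTENT") := by
          simpa [List.any_eq_true] using h1
        have h2' : ¬ l.any (fun s => s == "REPLAY_MISSING") := by
          simpa [List.any_eq_true] using h2
        have h3' : ¬ l.any (fun s => s == "REPLAY_DRIFT") := by
          simpa [List.any_eq_true] using h3
        simp [h1', h2', h3', hM3, pvVal]
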